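-- pv_equiv track=rewrite | github.com/basiralab/X-Node | data_processing/build_graphs.py | create_train_val_test_masks
-- ===== SOURCE A (Python) =====
-- def create_train_val_test_masks(datasets):
--     """
--     Create train/val/test masks based on dataset sizes.
--
--     Args:
--         datasets: List of datasets (train, val, test)
--
--     Returns:
--         tuple: (train_mask, val_mask, test_mask)
--     """
--     train_size = len(datasets[0])
--     val_size = len(datasets[1])
--     test_size = len(datasets[2])
--     total_size = train_size + val_size + test_size
--
--     train_mask = [i < train_size for i in range(total_size)]
--     val_mask = [train_size <= i < train_size + val_size for i in range(total_size)]
--     test_mask = [i >= train_size + val_size for i in range(total_size)]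
--
--     return train_mask, val_mask, test_mask
-- ===== SOURCE B (Python) =====
-- def create_train_val_test_masks(datasets):
--     masks = [[], [], []]
--     for j in range(3):
--         block = len(datasets[j])
--         for k in range(3):
--             masks[k] += [k == j] * block
--     return masks[0], masks[1], masks[2]
-- ===== Notes on version B (the rewrite author's own statement) =====
-- stated objective: alternative
-- what changed: A evaluates an index predicate at every position of range(total_size) separately for each of the three masks; B never forms index ranges or predicates: it makes one pass over the three splits, extending all three masks simultaneously with a one-hot block of len(datasets[j]) copies of (k == j).
import Mathlib
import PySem

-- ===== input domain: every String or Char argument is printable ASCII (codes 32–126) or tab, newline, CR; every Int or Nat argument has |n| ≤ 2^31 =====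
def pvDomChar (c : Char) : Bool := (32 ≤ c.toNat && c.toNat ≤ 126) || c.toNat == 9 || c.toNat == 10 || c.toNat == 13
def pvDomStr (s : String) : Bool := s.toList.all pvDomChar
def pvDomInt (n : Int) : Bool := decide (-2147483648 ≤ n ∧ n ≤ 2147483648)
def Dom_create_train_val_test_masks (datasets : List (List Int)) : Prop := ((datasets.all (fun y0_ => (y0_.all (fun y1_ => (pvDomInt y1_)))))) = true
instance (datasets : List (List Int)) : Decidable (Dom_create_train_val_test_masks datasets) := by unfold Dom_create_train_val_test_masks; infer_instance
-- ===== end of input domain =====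

-- B makes one pass over the three splits, growing all three masks at once with one-hot
-- blocks, instead of A's per-index predicate comprehensions over range(total_size).


-- ===== PORT A =====
def create_train_val_test_masks (datasets : List (List Int)) : List Bool × List Bool × List Bool :=
  let train_size : Int := ((PySem.List.pyGet? datasets 0).getD []).length
  let val_size : Int := ((PySem.List.pyGet? datasets 1).getD []).length
  let test_size : Int := ((PySem.List.pyGet? datasets 2).getD []).length
  let total_size : Int := train_size + val_size + test_size
  let train_mask := (PySem.List.pyRange 0 total_size 1).map (fun i => decide (i < train_size))
  let val_mask := (PySem.List.pyRange 0 total_size 1).map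
    (fun i => decide (train_size ≤ i ∧ i < train_size + val_size))
  let test_mask := (PySem.List.pyRange 0 total_size 1).map
    (fun i => decide (i ≥ train_size + val_size))
  (train_mask, val_mask, test_mask)

-- ===== PORT B =====
-- one iteration of B's outer loop: extend each mask with a one-hot block for split j
def pvExtendMasks (datasets : List (List Int)) (masks : List Bool × List Bool × List Bool)
    (j : Nat) : List Bool × List Bool × List Bool :=
  let block := ((PySem.List.pyGet? datasets (j : Int)).getD []).length
  (masks.1 ++ List.replicate block (decide (0 = j)),
   masks.2.1 ++ List.replicate block (decide (1 = j)),
   masks.2.2 ++ List.replicate block (decide (2 = j)))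

def create_train_val_test_masks_alt (datasets : List (List Int)) : List Bool × List Bool × List Bool :=
  (List.range 3).foldl (pvExtendMasks datasets) ([], [], [])

-- ===== PRECONDITION & SPEC =====
-- Pre_ excludes exactly the inputs where Python A raises IndexError (fewer than 3 datasets).
def Pre_create_train_val_test_masks (datasets : List (List Int)) : Prop := 3 ≤ datasets.length
instance (datasets : List (List Int)) : Decidable (Pre_create_train_val_test_masks datasets) := by
  unfold Pre_create_train_val_test_masks; infer_instance
def pvWitness_create_train_val_test_masks : List (List Int) := [[1], [2, 3], [4]]
def Spec_create_train_val_test_masks (datasets : List (List Int)) (out : List Bool × List Bool × List Bool) : Prop := out = create_train_val_test_masks_alt datasets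
instance (datasets : List (List Int)) (out : List Bool × List Bool × List Bool) : Decidable (Spec_create_train_val_test_masks datasets out) := by unfold Spec_create_train_val_test_masks; infer_instance

-- ===== CLAIM (what is proved, stated in full; the proofs are below) =====
def Claim_equal_create_train_val_test_masks : Prop := ∀ (datasets : List (List Int)), Dom_create_train_val_test_masks datasets → Pre_create_train_val_test_masks datasets → Spec_create_train_val_test_masks datasets (create_train_val_test_masks datasets)

-- ===== LEMMAS AND PROOFS =====

-- A map of a predicate that is constant on [a,b) over range(a,b) is a block.
theorem map_pyRange_const (a b : Int) (f : Int → Bool) (c : Bool)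
    (h : ∀ i, a ≤ i → i < b → f i = c) :
    (PySem.List.pyRange a b 1).map f = List.replicate (b - a).toNat c := by
  rw [PySem.List.pyRange_one, List.map_map, List.eq_replicate_iff]
  refine ⟨by simp, ?_⟩
  intro x hx
  simp only [List.mem_map, List.mem_range, Function.comp] at hx
  obtain ⟨k, hk, rfl⟩ := hx
  exact h _ (by omega) (by omega)

theorem mask_split (s m t : Nat) (f : Int → Bool) (c1 c2 c3 : Bool)
    (h1 : ∀ i : Int, 0 ≤ i → i < s → f i = c1)
    (h2 : ∀ i : Int, (s : Int) ≤ i → i < s + m → f i = c2)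
    (h3 : ∀ i : Int, (s : Int) + m ≤ i → i < s + m + t → f i = c3) :
    (PySem.List.pyRange 0 ((s : Int) + m + t) 1).map f =
      List.replicate s c1 ++ List.replicate m c2 ++ List.replicate t c3 := by
  rw [PySem.List.pyRange_one_append 0 (s : Int) ((s : Int) + m + t) (by omega) (by omega),
      PySem.List.pyRange_one_append (s : Int) ((s : Int) + m) ((s : Int) + m + t)
        (by omega) (by omega),
      List.map_append, List.map_append,
      map_pyRange_const _ _ _ _ h1, map_pyRange_const _ _ _ _ h2,
      map_pyRange_const _ _ _ _ h3,
      show ((s : Int) - 0).toNat = s by omega,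
      show ((s : Int) + m - s).toNat = m by omega,
      show ((s : Int) + m + t - ((s : Int) + m)).toNat = t by omega,
      List.append_assoc]

-- B's fold over range 3, unfolded to explicit one-hot blocks.
theorem alt_eq_blocks (datasets : List (List Int)) :
    create_train_val_test_masks_alt datasets =
      (List.replicate ((PySem.List.pyGet? datasets 0).getD []).length true ++
        (List.replicate ((PySem.List.pyGet? datasets 1).getD []).length false ++
          List.replicate ((PySem.List.pyGet? datasets 2).getD []).length false),
       List.replicate ((PySem.List.pyGet? datasets 0).getD []).length false ++
        (List.replicate ((PySem.List.pyGet? datasets 1).getD []).length true ++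
          List.replicate ((PySem.List.pyGet? datasets 2).getD []).length false),
       List.replicate ((PySem.List.pyGet? datasets 0).getD []).length false ++
        (List.replicate ((PySem.List.pyGet? datasets 1).getD []).length false ++
          List.replicate ((PySem.List.pyGet? datasets 2).getD []).length true)) := by
  show (List.range 3).foldl (pvExtendMasks datasets) ([], [], []) = _
  simp [List.range_succ, pvExtendMasks, List.append_assoc]
  rw [← List.append_assoc, List.replicate_append_replicate]

-- ===== VERDICT (by name: the statement is the Claim_ definition above) =====
theorem create_train_val_test_masks_spec : Claim_equal_create_train_val_test_masks := by
  intro datasets _ _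
  unfold Spec_create_train_val_test_masks
  rw [alt_eq_blocks]
  unfold create_train_val_test_masks
  simp only
  set s := ((PySem.List.pyGet? datasets 0).getD []).length with hs
  set m := ((PySem.List.pyGet? datasets 1).getD []).length with hm
  set t := ((PySem.List.pyGet? datasets 2).getD []).length with ht
  refine Prod.ext ?_ (Prod.ext ?_ ?_)
  · show (PySem.List.pyRange 0 ((s : Int) + m + t) 1).map _ = _
    rw [mask_split s m t _ true false false
      (fun i h1 h2 => by simp; omega) (fun i h1 h2 => by simp; omega)
      (fun i h1 h2 => by simp; omega), List.append_assoc]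
  · show (PySem.List.pyRange 0 ((s : Int) + m + t) 1).map _ = _
    rw [mask_split s m t _ false true false
      (fun i h1 h2 => by simp; omega) (fun i h1 h2 => by simp; omega)
      (fun i h1 h2 => by simp; omega), List.append_assoc]
  · show (PySem.List.pyRange 0 ((s : Int) + m + t) 1).map _ = _
    rw [mask_split s m t _ false false true
      (fun i h1 h2 => by simp; omega) (fun i h1 h2 => by simp; omega)
      (fun i h1 h2 => by simp; omega), List.append_assoc]
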